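-- pv_equiv track=rewrite | github.com/ategt/katas | plants_v_zombies.py | destroy_occupied_shooters
-- ===== SOURCE A (Python) =====
-- def destroy_occupied_shooters(lawn, zombies):
--     new_rows = []
--     for row_number, row in enumerate(lawn):
--         new_row = "%s" % (row,)
--         for column_number, cell in enumerate(row):
--             if cell.isalnum():
--                 if len(list(filter(lambda zombie: zombie[0] == column_number and zombie[1] == row_number, zombies))) > 0:
--                     new_row = new_row[:column_number] + ' ' + new_row[column_number+1:]
--
--         new_rows.append(new_row)
--
--     return new_rows
-- ===== SOURCE B (Python) =====
-- def destroy_occupied_shooters(lawn, zombies):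
--     bufs = [list(row) for row in lawn]
--     for col, row in zombies:
--         if 0 <= row < len(bufs) and 0 <= col < len(bufs[row]) and bufs[row][col].isalnum():
--             bufs[row][col] = ' '
--     return [''.join(b) for b in bufs]
-- ===== Notes on version B (the rewrite author's own statement) =====
-- stated objective: faster
-- what changed: Instead of scanning every grid cell and filtering the whole zombie list per alnum cell, B copies rows into char buffers and iterates once over the zombies, blanking each in-range alnum cell by direct indexing.
import Mathlib
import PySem

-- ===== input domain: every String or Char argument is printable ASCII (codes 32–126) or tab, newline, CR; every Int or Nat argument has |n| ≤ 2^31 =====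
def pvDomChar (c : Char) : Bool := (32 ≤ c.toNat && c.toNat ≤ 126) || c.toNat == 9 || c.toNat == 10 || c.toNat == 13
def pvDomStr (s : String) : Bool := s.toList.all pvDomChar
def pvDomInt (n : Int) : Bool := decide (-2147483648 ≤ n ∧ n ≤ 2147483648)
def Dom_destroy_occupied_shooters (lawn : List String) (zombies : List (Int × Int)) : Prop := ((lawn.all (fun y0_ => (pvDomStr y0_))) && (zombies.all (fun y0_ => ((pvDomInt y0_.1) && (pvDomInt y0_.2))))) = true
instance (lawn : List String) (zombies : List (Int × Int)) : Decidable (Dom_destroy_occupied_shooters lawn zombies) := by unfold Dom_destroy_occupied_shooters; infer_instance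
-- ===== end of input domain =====

-- B blanks in-range alnum cells by iterating over the zombie list once instead of scanning every cell and filtering all zombies per cell.

-- ===== PORT A =====
-- inner loop body: for column_number, cell in enumerate(row): if cell.isalnum(): if len(filter ...) > 0: splice ' ' at column_number
def dosRowA (zombies : List (Int × Int)) (row_number : Int) (row : List Char) : List Char :=
  (PySem.List.enumerate row 0).foldl
    (fun new_row p =>
      if PySem.Chars.isalnum p.2 then
        if (zombies.filter (fun zombie => zombie.1 == p.1 && zombie.2 == row_number)).length > 0 then
          PySem.List.slice new_row none (some p.1) ++ ' ' :: PySem.List.slice new_row (some (p.1 + 1)) none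
        else new_row
      else new_row)
    row

def destroy_occupied_shooters (lawn : List String) (zombies : List (Int × Int)) : List String :=
  (PySem.List.enumerate lawn 0).foldl
    (fun new_rows p => new_rows ++ [String.ofList (dosRowA zombies p.1 p.2.toList)]) []

-- ===== PORT B =====
-- one zombie step: if 0 <= row < len(bufs) and 0 <= col < len(bufs[row]) and bufs[row][col].isalnum(): bufs[row][col] = ' '
def dosStepB (bufs : List (List Char)) (z : Int × Int) : List (List Char) :=
  if 0 ≤ z.2 && z.2 < (bufs.length : Int) && 0 ≤ z.1 && z.1 < ((bufs.getD z.2.toNat []).length : Int)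
      && PySem.Chars.isalnum ((bufs.getD z.2.toNat []).getD z.1.toNat ' ') then
    bufs.set z.2.toNat ((bufs.getD z.2.toNat []).set z.1.toNat ' ')
  else bufs

def destroy_occupied_shooters_alt (lawn : List String) (zombies : List (Int × Int)) : List String :=
  (zombies.foldl dosStepB (lawn.map String.toList)).map String.ofList

-- ===== PRECONDITION & SPEC =====
def Spec_destroy_occupied_shooters (lawn : List String) (zombies : List (Int × Int)) (out : List String) : Prop := out = destroy_occupied_shooters_alt lawn zombies
instance (lawn : List String) (zombies : List (Int × Int)) (out : List String) : Decidable (Spec_destroy_occupied_shooters lawn zombies out) := by unfold Spec_destroy_occupied_shooters; infer_instance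

-- ===== CLAIM (what is proved, stated in full; the proofs are below) =====
def Claim_equal_destroy_occupied_shooters : Prop := ∀ (lawn : List String) (zombies : List (Int × Int)), Dom_destroy_occupied_shooters lawn zombies → Spec_destroy_occupied_shooters lawn zombies (destroy_occupied_shooters lawn zombies)

-- ===== LEMMAS AND PROOFS =====

/-- The common specification: cell (c,r) is blanked iff it is alphanumeric and some zombie sits there. -/
def pvCond (zombies : List (Int × Int)) (c : Nat) (r : Int) (ch : Char) : Bool :=
  PySem.Chars.isalnum ch && zombies.any (fun z => z.1 == (c : Int) && z.2 == r)

def pvMarkRow (zombies : List (Int × Int)) (r : Int) (row : List Char) : List Char :=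
  (row.zipIdx).map (fun q => if pvCond zombies q.2 r q.1 then ' ' else q.1)

def pvSpecGrid (zombies : List (Int × Int)) (g : List (List Char)) : List (List Char) :=
  (g.zipIdx).map (fun q => pvMarkRow zombies (q.2 : Int) q.1)

theorem length_pvMarkRow (zs : List (Int × Int)) (r : Int) (row : List Char) :
    (pvMarkRow zs r row).length = row.length := by
  simp [pvMarkRow]

theorem getElem_pvMarkRow (zs : List (Int × Int)) (r : Int) (row : List Char) (c : Nat)
    (hc : c < row.length) :
    (pvMarkRow zs r row)[c]'(by simp [length_pvMarkRow]; omega) =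
      if pvCond zs c r row[c] then ' ' else row[c] := by
  simp [pvMarkRow]

theorem length_pvSpecGrid (zs : List (Int × Int)) (g : List (List Char)) :
    (pvSpecGrid zs g).length = g.length := by
  simp [pvSpecGrid]

theorem getElem_pvSpecGrid (zs : List (Int × Int)) (g : List (List Char)) (i : Nat)
    (hi : i < g.length) :
    (pvSpecGrid zs g)[i]'(by simp [length_pvSpecGrid]; omega) = pvMarkRow zs (i : Int) g[i] := by
  simp [pvSpecGrid]

theorem isalnum_space : PySem.Chars.isalnum ' ' = false := by decide

/-- One zombie step equals marking with the singleton zombie list. -/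
theorem pvMarkRow_single_ne (z : Int × Int) (r : Int) (row : List Char)
    (hr : z.2 ≠ r) : pvMarkRow [z] r row = row := by
  apply List.ext_getElem
  · simp [length_pvMarkRow]
  intro j h3 h4
  rw [getElem_pvMarkRow _ _ _ _ h4]
  simp [pvCond, hr]

/-- One zombie step equals marking with the singleton zombie list. -/
theorem dosStepB_eq (z : Int × Int) (g : List (List Char)) :
    dosStepB g z = pvSpecGrid [z] g := by
  unfold dosStepB
  split_ifs with hc
  · simp only [Bool.and_eq_true, decide_eq_true_eq] at hc
    obtain ⟨⟨⟨⟨h2n, h2l⟩, h1n⟩, h1l⟩, hal⟩ := hc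
    have hR : z.2.toNat < g.length := by omega
    have hrowD : g.getD z.2.toNat [] = g[z.2.toNat] := List.getD_eq_getElem g [] hR
    rw [hrowD] at h1l hal
    have hC : z.1.toNat < g[z.2.toNat].length := by omega
    rw [List.getD_eq_getElem _ ' ' hC] at hal
    apply List.ext_getElem
    · simp [length_pvSpecGrid]
    intro i hi1 hi2
    have hig : i < g.length := by simpa using hi1
    rw [getElem_pvSpecGrid _ _ _ hig]
    by_cases hiR : i = z.2.toNat
    · subst hiR
      have hrow : (g.set z.2.toNat ((g.getD z.2.toNat []).set z.1.toNat ' '))[z.2.toNat]'hi1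
          = g[z.2.toNat].set z.1.toNat ' ' := by simp [List.getElem?_eq_getElem hR]
      rw [hrow]
      apply List.ext_getElem
      · simp [length_pvMarkRow]
      intro j hj1 hj2
      have hjg : j < g[z.2.toNat].length := by simpa using hj1
      rw [getElem_pvMarkRow _ _ _ _ hjg]
      by_cases hjC : j = z.1.toNat
      · subst hjC
        rw [List.getElem_set_self]
        have : pvCond [z] z.1.toNat (↑z.2.toNat) g[z.2.toNat][z.1.toNat] = true := by
          simp only [pvCond, List.any_cons, List.any_nil, Bool.or_false, Bool.and_eq_true,
            beq_iff_eq]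
          exact ⟨hal, by omega, by omega⟩
        rw [this, if_pos rfl]
      · rw [List.getElem_set_ne (by omega)]
        have : pvCond [z] j (↑z.2.toNat) g[z.2.toNat][j] = false := by
          simp only [pvCond, List.any_cons, List.any_nil, Bool.or_false]
          have : (z.1 == (j : Int)) = false := by simp only [beq_eq_false_iff_ne, ne_eq]; omega
          simp [this]
        rw [this, if_neg (by simp)]
    · rw [List.getElem_set_ne (by omega)]
      exact (pvMarkRow_single_ne z _ _ (by omega)).symm
  · apply List.ext_getElem
    · simp [length_pvSpecGrid]
    intro i hi1 hi2
    have hig : i < g.length := hi1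
    rw [getElem_pvSpecGrid _ _ _ hig]
    by_cases hiR : z.2 = (i : Int)
    case neg => exact (pvMarkRow_single_ne z _ _ hiR).symm
    apply List.ext_getElem
    · simp [length_pvMarkRow]
    intro j hj1 hj2
    rw [getElem_pvMarkRow _ _ _ _ hj1]
    have : pvCond [z] j (↑i) g[i][j] = false := by
      simp only [pvCond, List.any_cons, List.any_nil, Bool.or_false]
      by_contra hne
      apply hc
      simp only [Bool.and_eq_true, beq_iff_eq, Bool.not_eq_false] at hne
      obtain ⟨hal, hz1, hz2⟩ := hne
      have hRnat : z.2.toNat = i := by omega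
      have hrowD : g.getD z.2.toNat [] = g[i] := by
        rw [hRnat]; exact List.getD_eq_getElem g [] hig
      have hCnat : z.1.toNat = j := by omega
      simp only [Bool.and_eq_true, decide_eq_true_eq, hrowD]
      refine ⟨⟨⟨⟨by omega, by omega⟩, by omega⟩, by omega⟩, ?_⟩
      rw [List.getD_eq_getElem _ ' ' (by omega)]
      simp only [hCnat]
      exact hal
    rw [this, if_neg (by simp)]

/-- Marking twice composes. -/
theorem pvSpecGrid_comp (z : Int × Int) (zs : List (Int × Int)) (g : List (List Char)) :
    pvSpecGrid zs (pvSpecGrid [z] g) = pvSpecGrid (z :: zs) g := by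
  apply List.ext_getElem
  · simp [length_pvSpecGrid]
  intro i h1 h2
  have hi : i < g.length := by simpa [length_pvSpecGrid] using h2
  rw [getElem_pvSpecGrid _ _ _ (by simpa [length_pvSpecGrid] using hi),
      getElem_pvSpecGrid _ _ _ hi, getElem_pvSpecGrid _ _ _ hi]
  apply List.ext_getElem
  · simp [length_pvMarkRow]
  intro j h3 h4
  have hj : j < g[i].length := by simpa [length_pvMarkRow] using h4
  rw [getElem_pvMarkRow _ _ _ _ (by simpa [length_pvMarkRow] using hj),
      getElem_pvMarkRow _ _ _ _ hj, getElem_pvMarkRow _ _ _ _ hj]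
  simp only [pvCond, List.any_cons, List.any_nil, Bool.or_false]
  rcases (PySem.Chars.isalnum g[i][j]).eq_false_or_eq_true with ha | ha <;>
    rcases (z.1 == (j : Int) && z.2 == (i : Int)).eq_false_or_eq_true with hm | hm <;>
      simp [ha, hm, isalnum_space]

theorem pvSpecGrid_nil (g : List (List Char)) : pvSpecGrid [] g = g := by
  apply List.ext_getElem
  · simp [length_pvSpecGrid]
  intro i h1 h2
  rw [getElem_pvSpecGrid _ _ _ h2]
  apply List.ext_getElem
  · simp [length_pvMarkRow]
  intro j h3 h4
  rw [getElem_pvMarkRow _ _ _ _ h4]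
  simp [pvCond]

theorem foldB_eq (zs : List (Int × Int)) (g : List (List Char)) :
    zs.foldl dosStepB g = pvSpecGrid zs g := by
  induction zs generalizing g with
  | nil => simpa using (pvSpecGrid_nil g).symm
  | cons z zs ih =>
      simp only [List.foldl_cons, ih, dosStepB_eq, pvSpecGrid_comp]

theorem foldl_append_map {α β : Type} (g : α → β) :
    ∀ (l : List α) (init : List β),
      l.foldl (fun acc x => acc ++ [g x]) init = init ++ l.map g := by
  intro l
  induction l with
  | nil => simp
  | cons x xs ih => intro init; simp [ih]

/-- A's inner loop, started on a buffer whose tail from position `k` is the part of the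
row still to be scanned, marks exactly the remaining positions. -/
theorem rowA (zs : List (Int × Int)) (r : Int) :
    ∀ (tail : List Char) (k : Nat) (acc : List Char), acc.drop k = tail →
      (PySem.List.enumerate tail (k : Int)).foldl
        (fun new_row p =>
          if PySem.Chars.isalnum p.2 then
            if (zs.filter (fun zombie => zombie.1 == p.1 && zombie.2 == r)).length > 0 then
              PySem.List.slice new_row none (some p.1) ++ ' '
                :: PySem.List.slice new_row (some (p.1 + 1)) none
            else new_row
          else new_row)
        acc
      = acc.take k ++ (tail.zipIdx k).map (fun q => if pvCond zs q.2 r q.1 then ' ' else q.1) := by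
  intro tail
  induction tail with
  | nil =>
      intro k acc h
      have : acc.length ≤ k := by simpa [List.drop_eq_nil_iff] using h
      simp [PySem.List.enumerate, List.take_of_length_le this]
  | cons ch t ih =>
      intro k acc h
      have hlen := congrArg List.length h
      simp only [List.length_drop, List.length_cons] at hlen
      have hk : k < acc.length := by omega
      have hak : acc[k] = ch := by
        have := congrArg (fun l => l[0]?) h
        simp only [List.getElem?_drop, Nat.add_zero, List.getElem?_cons_zero] at this
        simpa [List.getElem?_eq_getElem hk] using this
      have hdrop : acc.drop (k + 1) = t := by
        have : (acc.drop k).drop 1 = (ch :: t).drop 1 := by rw [h]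
        simpa [List.drop_drop, Nat.add_comm] using this
      rw [PySem.List.enumerate_cons, List.foldl_cons]
      have hstep :
          (if PySem.Chars.isalnum ch then
            if (zs.filter (fun zombie => zombie.1 == (k : Int) && zombie.2 == r)).length > 0 then
              PySem.List.slice acc none (some (k : Int)) ++ ' '
                :: PySem.List.slice acc (some ((k : Int) + 1)) none
            else acc
          else acc) = if pvCond zs k r ch then acc.set k ' ' else acc := by
        have hfilter : ((zs.filter (fun zombie => zombie.1 == (k : Int) && zombie.2 == r)).length > 0)
            ↔ ((k : Int), r) ∈ zs := by
          rw [gt_iff_lt, List.length_pos_iff, Ne, List.filter_eq_nil_iff]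
          simp
        have hupd : PySem.List.slice acc none (some (k : Int)) ++ ' '
            :: PySem.List.slice acc (some ((k : Int) + 1)) none = acc.set k ' ' := by
          have h1 : ((k : Int) + 1) = ((k + 1 : Nat) : Int) := by push_cast; ring
          rw [PySem.List.slice_to_natCast, h1, PySem.List.slice_from_natCast,
            List.set_eq_take_append_cons_drop, if_pos hk]
        by_cases ha : PySem.Chars.isalnum ch = true
        · by_cases hf : (zs.filter (fun zombie => zombie.1 == (k : Int) && zombie.2 == r)).length > 0
          · rw [if_pos ha, if_pos hf, hupd, if_pos (by simp [pvCond, ha]; exact hfilter.mp hf)]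
          · rw [if_pos ha, if_neg hf,
              if_neg (by simp [pvCond, ha]; exact fun hh => hf (hfilter.mpr hh))]
        · rw [if_neg ha, if_neg (by simp [pvCond, Bool.eq_false_iff.mpr ha])]
      rw [hstep]
      have hgoal : ∀ acc' : List Char, acc'.drop (k + 1) = t →
          acc'.take (k + 1) = acc.take k ++ [if pvCond zs k r ch then ' ' else ch] →
          (PySem.List.enumerate t ((k : Int) + 1)).foldl
            (fun new_row p =>
              if PySem.Chars.isalnum p.2 then
                if (zs.filter (fun zombie => zombie.1 == p.1 && zombie.2 == r)).length > 0 then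
                  PySem.List.slice new_row none (some p.1) ++ ' '
                    :: PySem.List.slice new_row (some (p.1 + 1)) none
                else new_row
              else new_row)
            acc'
          = acc.take k ++ ((ch :: t).zipIdx k).map
              (fun q => if pvCond zs q.2 r q.1 then ' ' else q.1) := by
        intro acc' hd ht
        have h1 : ((k : Int) + 1) = ((k + 1 : Nat) : Int) := by push_cast; ring
        rw [h1, ih (k + 1) acc' hd, ht, List.zipIdx_cons, List.map_cons, List.append_assoc,
          List.singleton_append]
      apply hgoal
      · split_ifs with hcnd
        · rw [List.drop_set, if_pos (by omega)]; exact hdrop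
        · exact hdrop
      · have htk : acc.take (k + 1) = acc.take k ++ [ch] := by
          rw [List.take_add_one, List.getElem?_eq_getElem hk, hak]; rfl
        split_ifs with hcnd
        · rw [List.take_add_one, List.take_set,
            List.getElem?_set_self (by simpa using hk)]
          have : acc.take k = (acc.take k).set k ' ' := by
            rw [List.set_eq_of_length_le (by rw [List.length_take]; exact min_le_left _ _)]
          rw [← this]; rfl
        · exact htk

theorem dosRowA_eq (zs : List (Int × Int)) (r : Int) (row : List Char) :
    dosRowA zs r row = pvMarkRow zs r row := by
  unfold dosRowA pvMarkRow
  simpa using rowA zs r row 0 row (by simp)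

theorem destroy_occupied_shooters_spec : Claim_equal_destroy_occupied_shooters := by
  intro lawn zombies _
  unfold Spec_destroy_occupied_shooters destroy_occupied_shooters destroy_occupied_shooters_alt
  rw [foldB_eq, foldl_append_map, List.nil_append]
  apply List.ext_getElem
  · simp [length_pvSpecGrid, PySem.List.length_enumerate]
  intro i h1 h2
  have hig : i < lawn.length := by simpa [PySem.List.length_enumerate] using h1
  have hig2 : i < (lawn.map String.toList).length := by simpa using hig
  rw [List.getElem_map, List.getElem_map, getElem_pvSpecGrid _ _ _ hig2,
    PySem.List.getElem_enumerate, dosRowA_eq]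
  simp
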